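-- pv_equiv track=rewrite | github.com/daniel-reich/ubiquitous-fiesta | Bb9hTXYuvqx3aCm8d_7.py | alpha_clash
-- ===== SOURCE A (Python) =====
-- def alpha_clash(str_A, ind_A, str_Z, ind_Z):
--   lst_A = [i for n, i in enumerate(str_A) if n not in ind_Z]
--   lst_Z = [i for n, i in enumerate(str_Z) if n not in ind_A]
--   score_A = sum([ord(i) - ord(j) for i, j in zip(lst_A, lst_Z)
--                 if ord(i) > ord(j)])
--   score_Z = sum([ord(i) - ord(j) for i, j in zip(lst_Z, lst_A)
--                 if ord(i) > ord(j)])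
--   return {'A': score_A, 'Z': score_Z}
-- ===== SOURCE B (Python) =====
-- def alpha_clash(str_A, ind_A, str_Z, ind_Z):
--     # Streaming two-pointer scan: never materializes the filtered lists.
--     # Two cursors walk the original strings, skipping dropped indices on the
--     # fly; each surviving pair contributes to exactly one score by the sign
--     # of its ord-difference.  Stops when either cursor runs off its string
--     # (same truncation as zip).
--     score_A = 0
--     score_Z = 0
--     i = 0
--     j = 0
--     nA = len(str_A)
--     nZ = len(str_Z)
--     while True:
--         while i < nA and i in ind_Z:
--             i += 1
--         while j < nZ and j in ind_A:
--             j += 1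
--         if i >= nA or j >= nZ:
--             break
--         d = ord(str_A[i]) - ord(str_Z[j])
--         if d > 0:
--             score_A += d
--         elif d < 0:
--             score_Z -= d
--         i += 1
--         j += 1
--     return {'A': score_A, 'Z': score_Z}
-- ===== Notes on version B (the rewrite author's own statement) =====
-- stated objective: alternative
-- what changed: B replaces A's staged pipeline (build two filtered lists, then two separate filter+sum comprehensions over their zip) with a streaming two-pointer loop over the original strings that skips dropped indices in place and accumulates both scores in a single pass, allocating no intermediate lists.
import Mathlib
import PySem

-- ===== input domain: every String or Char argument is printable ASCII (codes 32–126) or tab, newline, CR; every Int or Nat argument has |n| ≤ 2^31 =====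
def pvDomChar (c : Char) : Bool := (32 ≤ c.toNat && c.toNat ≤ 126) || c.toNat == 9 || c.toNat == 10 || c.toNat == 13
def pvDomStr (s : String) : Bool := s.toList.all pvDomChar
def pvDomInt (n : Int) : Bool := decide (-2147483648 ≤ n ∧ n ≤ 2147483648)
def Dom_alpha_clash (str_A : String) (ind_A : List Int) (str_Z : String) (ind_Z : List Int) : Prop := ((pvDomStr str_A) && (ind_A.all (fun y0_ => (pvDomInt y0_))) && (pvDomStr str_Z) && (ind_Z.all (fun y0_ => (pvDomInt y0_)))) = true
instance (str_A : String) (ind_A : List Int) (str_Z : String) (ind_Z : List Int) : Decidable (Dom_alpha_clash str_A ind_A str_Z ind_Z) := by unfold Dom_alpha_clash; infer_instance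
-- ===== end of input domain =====

-- B replaces A's staged pipeline (two filtered lists, then two filter+sum passes over their zip)
-- with a streaming two-pointer loop over the original strings, skipping dropped indices in place
-- and accumulating both scores in one pass (objective: alternative; no intermediate lists).

-- ===== PORT A =====
def alpha_clash (str_A : String) (ind_A : List Int) (str_Z : String) (ind_Z : List Int) : List (String × Int) :=
  let lst_A := ((PySem.List.enumerate str_A.toList).filter (fun p => !(decide (p.1 ∈ ind_Z)))).map (·.2)
  let lst_Z := ((PySem.List.enumerate str_Z.toList).filter (fun p => !(decide (p.1 ∈ ind_A)))).map (·.2)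
  let score_A := (((lst_A.zip lst_Z).filter (fun p => decide (p.1.toNat > p.2.toNat))).map
                  (fun p => ((p.1.toNat : Int) - (p.2.toNat : Int)))).sum
  let score_Z := (((lst_Z.zip lst_A).filter (fun p => decide (p.1.toNat > p.2.toNat))).map
                  (fun p => ((p.1.toNat : Int) - (p.2.toNat : Int)))).sum
  [("A", score_A), ("Z", score_Z)]

-- ===== PORT B =====
-- inner `while i < n and i in drop: i += 1` loop of Source B (fuel is a totality guard only:
-- called with fuel = len - i, enough for the loop to run to its Python exit condition)
def pvSkip (fuel : Nat) (i : Nat) (len : Nat) (drop : List Int) : Nat :=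
  match fuel with
  | 0 => i
  | f + 1 => if i < len ∧ (i : Int) ∈ drop then pvSkip f (i + 1) len drop else i

-- outer `while True:` loop of Source B, over the two cursors and both accumulators
-- (fuel is a totality guard only: called with fuel = len(str_A) + 1, enough iterations)
def pvLoop (fuel : Nat) (sA sZ : List Char) (ind_A ind_Z : List Int) (i j : Nat) (scA scZ : Int) : Int × Int :=
  match fuel with
  | 0 => (scA, scZ)
  | f + 1 =>
    let i' := pvSkip (sA.length - i) i sA.length ind_Z
    let j' := pvSkip (sZ.length - j) j sZ.length ind_A
    if h : i' < sA.length ∧ j' < sZ.length then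
      let d : Int := (sA[i'].toNat : Int) - (sZ[j'].toNat : Int)
      if d > 0 then pvLoop f sA sZ ind_A ind_Z (i' + 1) (j' + 1) (scA + d) scZ
      else if d < 0 then pvLoop f sA sZ ind_A ind_Z (i' + 1) (j' + 1) scA (scZ - d)
      else pvLoop f sA sZ ind_A ind_Z (i' + 1) (j' + 1) scA scZ
    else (scA, scZ)

def alpha_clash_alt (str_A : String) (ind_A : List Int) (str_Z : String) (ind_Z : List Int) : List (String × Int) :=
  let s := pvLoop (str_A.toList.length + 1) str_A.toList str_Z.toList ind_A ind_Z 0 0 0 0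
  [("A", s.1), ("Z", s.2)]

-- ===== PRECONDITION & SPEC =====
def Spec_alpha_clash (str_A : String) (ind_A : List Int) (str_Z : String) (ind_Z : List Int) (out : List (String × Int)) : Prop := out = alpha_clash_alt str_A ind_A str_Z ind_Z
instance (str_A : String) (ind_A : List Int) (str_Z : String) (ind_Z : List Int) (out : List (String × Int)) : Decidable (Spec_alpha_clash str_A ind_A str_Z ind_Z out) := by unfold Spec_alpha_clash; infer_instance

-- ===== CLAIM =====
def Claim_equal_alpha_clash : Prop := ∀ (str_A : String) (ind_A : List Int) (str_Z : String) (ind_Z : List Int), Dom_alpha_clash str_A ind_A str_Z ind_Z → Spec_alpha_clash str_A ind_A str_Z ind_Z (alpha_clash str_A ind_A str_Z ind_Z)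

-- ===== LEMMAS AND PROOFS =====

-- the two one-direction positive-part sums of A
def pvPos (l : List (Char × Char)) : Int :=
  ((l.filter (fun p => decide (p.1.toNat > p.2.toNat))).map
    (fun p => ((p.1.toNat : Int) - (p.2.toNat : Int)))).sum

def pvNeg (l : List (Char × Char)) : Int :=
  ((l.filter (fun p => decide (p.2.toNat > p.1.toNat))).map
    (fun p => ((p.2.toNat : Int) - (p.1.toNat : Int)))).sum

lemma pvSwap_eq (l : List (Char × Char)) :
    pvPos (l.map Prod.swap) = pvNeg l := by
  induction l with
  | nil => simp [pvPos, pvNeg]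
  | cons hd tl ih =>
    obtain ⟨x, y⟩ := hd
    simp only [pvPos, pvNeg, List.map_cons, List.filter_cons] at *
    by_cases h : y.toNat > x.toNat <;> simp [h, Prod.swap] at * <;> simp [ih]

-- the filtered suffix of s from cursor position i
def pvRest (s : List Char) (drop : List Int) (i : Nat) : List Char :=
  (((PySem.List.enumerate s).drop i).filter (fun p => !(decide (p.1 ∈ drop)))).map (·.2)

lemma pvRest_stop (s : List Char) (drop : List Int) (i : Nat) (h : s.length ≤ i) :
    pvRest s drop i = [] := by
  simp [pvRest, List.drop_eq_nil_of_le, PySem.List.length_enumerate, h]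

lemma pvRest_step (s : List Char) (drop : List Int) (i : Nat) (h : i < s.length) :
    pvRest s drop i =
      if (i : Int) ∈ drop then pvRest s drop (i + 1)
      else s[i] :: pvRest s drop (i + 1) := by
  have hlen : i < (PySem.List.enumerate s).length := by
    simpa [PySem.List.length_enumerate] using h
  have hdrop : (PySem.List.enumerate s).drop i
      = (PySem.List.enumerate s)[i] :: (PySem.List.enumerate s).drop (i + 1) :=
    List.drop_eq_getElem_cons hlen
  have hget : (PySem.List.enumerate s)[i] = ((i : Int), s[i]) := by
    simpa using PySem.List.getElem_enumerate (xs := s) (s := 0) (k := i) (h := hlen)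
  by_cases hm : (i : Int) ∈ drop <;>
    simp [pvRest, hdrop, hget, hm]

lemma pvSkip_ge (fuel : Nat) : ∀ (i : Nat) (len : Nat) (drop : List Int), i ≤ pvSkip fuel i len drop := by
  induction fuel with
  | zero => intro i len drop; exact le_refl i
  | succ f ih =>
    intro i len drop
    rw [pvSkip]
    split
    · exact le_trans (Nat.le_succ i) (ih (i + 1) len drop)
    · exact le_refl i

lemma pvSkip_not (fuel : Nat) : ∀ (i len : Nat) (drop : List Int), len ≤ fuel + i →
    ¬ (pvSkip fuel i len drop < len ∧ ((pvSkip fuel i len drop : Nat) : Int) ∈ drop) := by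
  induction fuel with
  | zero => intro i len drop hf h; simp [pvSkip] at h; omega
  | succ f ih =>
    intro i len drop hf
    rw [pvSkip]
    split
    · exact ih (i + 1) len drop (by omega)
    · rename_i h
      exact h

lemma pvRest_skip (fuel : Nat) : ∀ (s : List Char) (drop : List Int) (i : Nat),
    pvRest s drop (pvSkip fuel i s.length drop) = pvRest s drop i := by
  induction fuel with
  | zero => intro s drop i; rfl
  | succ f ih =>
    intro s drop i
    rw [pvSkip]
    split
    · rename_i h
      rw [ih s drop (i + 1)]
      rw [pvRest_step s drop i h.1, if_pos h.2]
    · rfl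

lemma pvPos_cons (p : Char × Char) (l : List (Char × Char)) :
    pvPos (p :: l) = (if p.1.toNat > p.2.toNat then ((p.1.toNat : Int) - p.2.toNat) else 0) + pvPos l := by
  by_cases h : p.1.toNat > p.2.toNat <;> simp [pvPos, h]

lemma pvNeg_cons (p : Char × Char) (l : List (Char × Char)) :
    pvNeg (p :: l) = (if p.2.toNat > p.1.toNat then ((p.2.toNat : Int) - p.1.toNat) else 0) + pvNeg l := by
  by_cases h : p.2.toNat > p.1.toNat <;> simp [pvNeg, h]

lemma pvLoop_eq (fuel : Nat) : ∀ (sA sZ : List Char) (indA indZ : List Int) (i j : Nat) (a z : Int),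
    sA.length < fuel + i →
    pvLoop fuel sA sZ indA indZ i j a z
      = (a + pvPos ((pvRest sA indZ i).zip (pvRest sZ indA j)),
         z + pvNeg ((pvRest sA indZ i).zip (pvRest sZ indA j))) := by
  induction fuel with
  | zero =>
    intro sA sZ indA indZ i j a z hf
    rw [pvRest_stop sA indZ i (by omega)]
    simp [pvLoop, pvPos, pvNeg]
  | succ f ih =>
    intro sA sZ indA indZ i j a z hf
    rw [pvLoop]
    rw [← pvRest_skip (sA.length - i) sA indZ i, ← pvRest_skip (sZ.length - j) sZ indA j]
    split
    · rename_i h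
      obtain ⟨hiL, hjL⟩ := h
      have hiA : ¬ (((pvSkip (sA.length - i) i sA.length indZ : Nat) : Int) ∈ indZ) :=
        fun hm => pvSkip_not (sA.length - i) i sA.length indZ (by omega) ⟨hiL, hm⟩
      have hjZ : ¬ (((pvSkip (sZ.length - j) j sZ.length indA : Nat) : Int) ∈ indA) :=
        fun hm => pvSkip_not (sZ.length - j) j sZ.length indA (by omega) ⟨hjL, hm⟩
      rw [pvRest_step sA indZ _ hiL, if_neg hiA, pvRest_step sZ indA _ hjL, if_neg hjZ]
      simp only [List.zip_cons_cons, pvPos_cons, pvNeg_cons]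
      have hge := pvSkip_ge (sA.length - i) i sA.length indZ
      have hA := fun a z => ih sA sZ indA indZ (pvSkip (sA.length - i) i sA.length indZ + 1)
        (pvSkip (sZ.length - j) j sZ.length indA + 1) a z (by omega)
      by_cases h1 : (((sA[pvSkip (sA.length - i) i sA.length indZ]'hiL).toNat : Int)
          - ((sZ[pvSkip (sZ.length - j) j sZ.length indA]'hjL).toNat : Int)) > 0
      · rw [if_pos h1, hA]
        have e1 : (sA[pvSkip (sA.length - i) i sA.length indZ]'hiL).toNat
            > (sZ[pvSkip (sZ.length - j) j sZ.length indA]'hjL).toNat := by omega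
        have e2 : ¬ (sZ[pvSkip (sZ.length - j) j sZ.length indA]'hjL).toNat
            > (sA[pvSkip (sA.length - i) i sA.length indZ]'hiL).toNat := by omega
        simp only [e1, e2, if_true, if_false]
        simp only [Prod.mk.injEq]; constructor <;> ring
      · by_cases h2 : (((sA[pvSkip (sA.length - i) i sA.length indZ]'hiL).toNat : Int)
            - ((sZ[pvSkip (sZ.length - j) j sZ.length indA]'hjL).toNat : Int)) < 0
        · rw [if_neg h1, if_pos h2, hA]
          have e1 : ¬ (sA[pvSkip (sA.length - i) i sA.length indZ]'hiL).toNat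
              > (sZ[pvSkip (sZ.length - j) j sZ.length indA]'hjL).toNat := by omega
          have e2 : (sZ[pvSkip (sZ.length - j) j sZ.length indA]'hjL).toNat
              > (sA[pvSkip (sA.length - i) i sA.length indZ]'hiL).toNat := by omega
          simp only [e1, e2, if_true, if_false]
          simp only [Prod.mk.injEq]; constructor <;> ring
        · rw [if_neg h1, if_neg h2, hA]
          have e1 : ¬ (sA[pvSkip (sA.length - i) i sA.length indZ]'hiL).toNat
              > (sZ[pvSkip (sZ.length - j) j sZ.length indA]'hjL).toNat := by omega
          have e2 : ¬ (sZ[pvSkip (sZ.length - j) j sZ.length indA]'hjL).toNat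
              > (sA[pvSkip (sA.length - i) i sA.length indZ]'hiL).toNat := by omega
          simp only [e1, e2, if_false]
          simp only [Prod.mk.injEq]; constructor <;> ring
    · rename_i h
      rcases Decidable.not_and_iff_not_or_not.mp h with h' | h'
      · rw [pvRest_stop sA indZ _ (by omega)]
        simp [pvPos, pvNeg]
      · rw [pvRest_stop sZ indA _ (by omega)]
        simp [pvPos, pvNeg]

-- ===== VERDICT =====
theorem alpha_clash_spec : Claim_equal_alpha_clash := by
  intro str_A ind_A str_Z ind_Z _
  unfold Spec_alpha_clash alpha_clash alpha_clash_alt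
  rw [pvLoop_eq (str_A.toList.length + 1) _ _ _ _ 0 0 0 0 (by omega)]
  have h0A : pvRest str_A.toList ind_Z 0
      = ((PySem.List.enumerate str_A.toList).filter (fun p => !(decide (p.1 ∈ ind_Z)))).map (·.2) := by
    simp [pvRest]
  have h0Z : pvRest str_Z.toList ind_A 0
      = ((PySem.List.enumerate str_Z.toList).filter (fun p => !(decide (p.1 ∈ ind_A)))).map (·.2) := by
    simp [pvRest]
  rw [h0A, h0Z]
  have hswap : ∀ l : List (Char × Char), pvNeg l = pvPos (l.map Prod.swap) :=
    fun l => (pvSwap_eq l).symm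
  simp only [zero_add]
  rw [hswap, List.zip_swap]
  rfl
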